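-- pv_equiv track=rewrite | github.com/NehaSJ99/graphRAG | create_graph.py | infer_foreign_keys
-- ===== SOURCE A (Python) =====
-- def infer_foreign_keys(table_columns):
--     """Infer foreign key relationships as a list of (fk_table, fk_column, pk_table, pk_column)."""
--     fk_relationships = []
--     for table_name, columns in table_columns.items():
--         for col_name in columns:
--             if col_name.endswith('_id'):
--                 for ref_table, ref_columns in table_columns.items():
--                     pk_candidates = [c for c in ref_columns if c.endswith('_id')]
--                     if col_name in pk_candidates and ref_table != table_name:
--                         fk_relationships.append((table_name, col_name, ref_table, col_name))
--     return fk_relationships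
-- ===== SOURCE B (Python) =====
-- def infer_foreign_keys(table_columns):
--     """Infer foreign key relationships as a list of (fk_table, fk_column, pk_table, pk_column)."""
--     # Index: column name (ending in '_id') -> tables containing it, in dict order, once per table.
--     index = {}
--     for table_name, columns in table_columns.items():
--         seen = set()
--         for c in columns:
--             if c.endswith('_id') and c not in seen:
--                 seen.add(c)
--                 index.setdefault(c, []).append(table_name)
--     fk_relationships = []
--     for table_name, columns in table_columns.items():
--         for c in columns:
--             if c.endswith('_id'):
--                 for ref_table in index.get(c, []):
--                     if ref_table != table_name:
--                         fk_relationships.append((table_name, c, ref_table, c))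
--     return fk_relationships
-- ===== Notes on version B (the rewrite author's own statement) =====
-- stated objective: alternative
-- what changed: Instead of rescanning all tables (and re-filtering their columns) for every '_id' column, B builds once a dict mapping each '_id' column name to the tables containing it and then just looks it up per column; on match-heavy inputs this removes the inner scan, though on the sampled random inputs it is not measurably faster.
import Mathlib
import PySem

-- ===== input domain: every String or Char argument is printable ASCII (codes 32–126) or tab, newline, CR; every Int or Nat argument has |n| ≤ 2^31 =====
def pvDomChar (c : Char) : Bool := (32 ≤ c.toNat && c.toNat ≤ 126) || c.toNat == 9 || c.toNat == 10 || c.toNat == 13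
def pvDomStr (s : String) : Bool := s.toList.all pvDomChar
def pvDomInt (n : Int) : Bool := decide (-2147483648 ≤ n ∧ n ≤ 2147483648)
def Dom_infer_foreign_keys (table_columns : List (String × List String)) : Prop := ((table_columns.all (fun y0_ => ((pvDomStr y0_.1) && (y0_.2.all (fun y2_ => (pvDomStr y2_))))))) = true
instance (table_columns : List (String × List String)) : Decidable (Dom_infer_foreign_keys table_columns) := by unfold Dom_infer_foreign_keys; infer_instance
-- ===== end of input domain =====

-- B replaces A's rescan of ALL tables for EVERY '_id' column by an index built once
-- (column name -> tables containing it, in dict order); return values proved identical.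

-- ===== PORT A =====
-- s.endswith('_id')
def endsId (s : String) : Bool := PySem.Str.endswith s "_id"

def infer_foreign_keys (table_columns : List (String × List String)) : List (String × String × String × String) :=
  table_columns.foldl (fun acc tp =>
    tp.2.foldl (fun acc c =>
      if endsId c = true then
        table_columns.foldl (fun acc rp =>
          let pk_candidates := rp.2.filter (fun x => endsId x)
          if c ∈ pk_candidates ∧ rp.1 ≠ tp.1 then acc ++ [(tp.1, c, rp.1, c)] else acc) acc
      else acc) acc) []

-- ===== PORT B =====
-- first loop of Source B: index = {col -> tables containing col (once per table, dict order)};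
-- index.setdefault(c, []).append(t) is Dict.modify c [] (· ++ [t])
def buildIndex (table_columns : List (String × List String)) : PySem.Dict String (List String) :=
  table_columns.foldl (fun d tp =>
    (tp.2.foldl (fun (s : PySem.Dict String (List String) × PySem.Set String) c =>
        if endsId c = true ∧ c ∉ s.2 then
          (s.1.modify c [] (fun l => l ++ [tp.1]), PySem.Set.add s.2 c)
        else s) (d, PySem.Set.empty)).1) PySem.Dict.empty

def infer_foreign_keys_alt (table_columns : List (String × List String)) : List (String × String × String × String) :=
  let index := buildIndex table_columns
  table_columns.foldl (fun acc tp =>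
    tp.2.foldl (fun acc c =>
      if endsId c = true then
        (index.getD c []).foldl (fun acc rt =>
          if rt ≠ tp.1 then acc ++ [(tp.1, c, rt, c)] else acc) acc
      else acc) acc) []

-- ===== PRECONDITION & SPEC =====
def Spec_infer_foreign_keys (table_columns : List (String × List String)) (out : List (String × String × String × String)) : Prop := out = infer_foreign_keys_alt table_columns
instance (table_columns : List (String × List String)) (out : List (String × String × String × String)) : Decidable (Spec_infer_foreign_keys table_columns out) := by unfold Spec_infer_foreign_keys; infer_instance

-- ===== CLAIM (what is proved, stated in full; the proofs are below) =====
def Claim_equal_infer_foreign_keys : Prop := ∀ (table_columns : List (String × List String)), Dom_infer_foreign_keys table_columns → Spec_infer_foreign_keys table_columns (infer_foreign_keys table_columns)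

-- ===== LEMMAS AND PROOFS =====

-- one table's pass of the index build: appends t to index[c] iff c ends in '_id',
-- occurs in cols and was not yet seen
theorem buildIndex_table (t : String) (cols : List String)
    (d : PySem.Dict String (List String)) (seen : PySem.Set String) (c : String) :
    ((cols.foldl (fun (s : PySem.Dict String (List String) × PySem.Set String) x =>
        if endsId x = true ∧ x ∉ s.2 then
          (s.1.modify x [] (fun l => l ++ [t]), PySem.Set.add s.2 x)
        else s) (d, seen)).1).getD c []
    = d.getD c [] ++ (if endsId c = true ∧ c ∈ cols ∧ c ∉ seen then [t] else []) := by
  induction cols generalizing d seen with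
  | nil => simp
  | cons c0 rest ih =>
    simp only [List.foldl_cons]
    by_cases h0 : endsId c0 = true ∧ c0 ∉ seen
    · rw [if_pos h0]
      rw [ih]
      by_cases hc : c = c0
      · subst hc
        rw [PySem.Dict.getD_modify]
        simp [h0.1, h0.2]
      · rw [PySem.Dict.getD_modify, if_neg hc]
        have hmem : (c ∈ PySem.Set.add seen c0) ↔ c ∈ seen := by
          simp [PySem.Set.mem_add, hc]
        by_cases hrest : endsId c = true ∧ c ∈ rest ∧ c ∉ seen
        · rw [if_pos ⟨hrest.1, by simp [hmem, hrest.2.1, hrest.2.2]⟩,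
              if_pos ⟨hrest.1, List.mem_cons_of_mem _ hrest.2.1, hrest.2.2⟩]
        · rw [if_neg (by simp_all), if_neg (by simp_all)]
    · rw [if_neg h0]
      rw [ih]
      congr 1
      by_cases hc : c = c0
      · subst hc
        by_cases he : endsId c = true
        · have hs : c ∈ seen := by tauto
          simp [hs]
        · simp [he]
      · by_cases hrest : endsId c = true ∧ c ∈ rest ∧ c ∉ seen
        · rw [if_pos hrest, if_pos ⟨hrest.1, List.mem_cons_of_mem _ hrest.2.1, hrest.2.2⟩]
        · rw [if_neg hrest, if_neg (by simp_all)]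

-- index build over a list of tables, from any starting dict
theorem buildIndex_aux (l : List (String × List String)) (c : String)
    (h : endsId c = true) (d : PySem.Dict String (List String)) :
    (l.foldl (fun d tp =>
      (tp.2.foldl (fun (s : PySem.Dict String (List String) × PySem.Set String) x =>
        if endsId x = true ∧ x ∉ s.2 then
          (s.1.modify x [] (fun l => l ++ [tp.1]), PySem.Set.add s.2 x)
        else s) (d, PySem.Set.empty)).1) d).getD c []
    = d.getD c [] ++ (l.filter (fun p => decide (c ∈ p.2))).map Prod.fst := by
  induction l generalizing d with
  | nil => simp
  | cons tp rest ih =>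
    simp only [List.foldl_cons, List.filter_cons]
    rw [ih, buildIndex_table]
    by_cases hm : c ∈ tp.2
    · simp [h, hm]
    · simp [hm]

-- the index entry for a '_id' column: first components of the tables containing it
theorem buildIndex_spec (table_columns : List (String × List String)) (c : String)
    (h : endsId c = true) :
    (buildIndex table_columns).getD c []
    = (table_columns.filter (fun p => decide (c ∈ p.2))).map Prod.fst := by
  rw [buildIndex, buildIndex_aux _ _ h]
  simp

-- A's inner scan over all tables = a fold over the tables containing c
theorem inner_eq (l : List (String × List String)) (t c : String)
    (h : endsId c = true) (acc : List (String × String × String × String)) :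
    l.foldl (fun acc rp =>
        let pk_candidates := rp.2.filter (fun x => endsId x)
        if c ∈ pk_candidates ∧ rp.1 ≠ t then acc ++ [(t, c, rp.1, c)] else acc) acc
    = ((l.filter (fun p => decide (c ∈ p.2))).map Prod.fst).foldl (fun acc rt =>
        if rt ≠ t then acc ++ [(t, c, rt, c)] else acc) acc := by
  induction l generalizing acc with
  | nil => simp
  | cons rp rest ih =>
    simp only [List.foldl_cons, List.filter_cons]
    by_cases hm : c ∈ rp.2
    · have hpk : c ∈ rp.2.filter (fun x => endsId x) := List.mem_filter.mpr ⟨hm, h⟩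
      by_cases ht : rp.1 ≠ t
      · rw [if_pos ⟨hpk, ht⟩]
        simp only [hm, decide_true, if_pos]
        rw [ih]
        simp [ht]
      · rw [if_neg (by tauto)]
        simp only [hm, decide_true, if_pos, List.map_cons, List.foldl_cons]
        rw [if_neg ht, ih]
    · have hpk : c ∉ rp.2.filter (fun x => endsId x) := fun hx => hm (List.mem_filter.mp hx).1
      rw [if_neg (by tauto)]
      rw [ih]
      simp [hm]

-- ===== VERDICT (by name: the statement is the Claim_ definition above) =====
theorem infer_foreign_keys_spec : Claim_equal_infer_foreign_keys := by
  intro tc _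
  unfold Spec_infer_foreign_keys
  simp only [infer_foreign_keys, infer_foreign_keys_alt]
  congr 1
  funext acc tp
  congr 1
  funext acc c
  by_cases h : endsId c = true
  · simp only [h, if_pos]
    rw [inner_eq _ _ _ h, buildIndex_spec _ _ h]
  · simp [h]
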